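-- pv_equiv track=rewrite | github.com/lsliegeo/advent-of-code-2022 | src/advent_of_code/day_3.py | part2
-- ===== SOURCE A (Python) =====
-- import string
--
-- def priority(char: str) -> int:
--     return string.ascii_letters.index(char) + 1
--
-- def part2(input_data: str):
--     score = 0
--     lines = [line for line in input_data.split('\n') if line]
--     for group_index in range(0, len(lines), 3):
--         group = lines[group_index:group_index + 3]
--         common_item = set(group[0]) & set(group[1]) & set(group[2])
--         if len(common_item) != 1:
--             raise ValueError()
--         score += priority(list(common_item)[0])
--     return score
-- ===== SOURCE B (Python) =====
-- def part2(input_data: str):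
--     score = 0
--     lines = [line for line in input_data.split('\n') if line]
--     for group_index in range(0, len(lines), 3):
--         group = lines[group_index:group_index + 3]
--         counts = {}
--         for line_index in range(3):
--             for char in set(group[line_index]):
--                 counts[char] = counts.get(char, 0) + 1
--         common = [char for char in dict.fromkeys(group[0]) if counts[char] == 3]
--         if len(common) != 1:
--             raise ValueError()
--         char = common[0]
--         score += ord(char) - 96 if 'a' <= char <= 'z' else ord(char) - 38
--     return score
-- ===== Notes on version B (the rewrite author's own statement) =====
-- stated objective: alternative
-- what changed: Replaces the triple set-intersection per group by a frequency-count table (chars counted once per line's character set, keep those with count 3) and replaces string.ascii_letters.index with direct ord arithmetic.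
import Mathlib
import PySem

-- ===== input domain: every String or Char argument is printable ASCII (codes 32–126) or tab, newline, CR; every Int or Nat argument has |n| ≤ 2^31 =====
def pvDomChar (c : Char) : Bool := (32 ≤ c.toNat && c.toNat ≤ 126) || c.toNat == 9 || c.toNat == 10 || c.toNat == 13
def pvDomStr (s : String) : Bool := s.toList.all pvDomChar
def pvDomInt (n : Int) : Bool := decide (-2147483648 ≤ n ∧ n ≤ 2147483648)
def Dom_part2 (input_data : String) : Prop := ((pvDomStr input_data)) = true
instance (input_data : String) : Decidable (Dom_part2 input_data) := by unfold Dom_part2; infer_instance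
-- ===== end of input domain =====

-- B replaces the per-group triple set-intersection by a frequency-count table and
-- string.ascii_letters.index by ord arithmetic (objective: alternative decomposition, same cost).

-- the nonempty lines of the input (shared line of Python in A and B:
-- 'lines = [line for line in input_data.split('\n') if line]')
def pvLines (input_data : String) : List String :=
  ((PySem.Str.split? input_data "\n").getD []).filter (fun line => line ≠ "")

-- ===== PORT A =====
def pvAsciiLetters : String := "abcdefghijklmnopqrstuvwxyzABCDEFGHIJKLMNOPQRSTUVWXYZ"

-- priority(char); where Python's .index raises ValueError (char not a letter) the input is outside Pre_
def pvPriority (c : Char) : Int :=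
  ((PySem.List.index? pvAsciiLetters.toList c).getD 0 : Int) + 1

-- one iteration of A's loop body for the group starting at index gi
def pvStepA (lines : List String) (score : Int) (gi : Int) : Int :=
  let group := PySem.List.slice lines (some gi) (some (gi + 3))
  -- group[0]/group[1]/group[2]: an out-of-range access is IndexError, outside Pre_
  let common : PySem.Set Char :=
    PySem.Set.inter
      (PySem.Set.inter (PySem.Set.ofList (PySem.List.pyGetD group 0 "").toList)
                       (PySem.Set.ofList (PySem.List.pyGetD group 1 "").toList))
      (PySem.Set.ofList (PySem.List.pyGetD group 2 "").toList)
  if common.length ≠ 1 then score  -- raise ValueError: outside Pre_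
  else score + pvPriority (PySem.List.pyGetD common 0 ' ')

def part2 (input_data : String) : Int :=
  let lines := pvLines input_data
  (PySem.List.pyRange 0 lines.length 3).foldl (pvStepA lines) 0

-- ===== PORT B =====
def pvPriorityOrd (c : Char) : Int :=
  if 'a' ≤ c ∧ c ≤ 'z' then (c.toNat : Int) - 96 else (c.toNat : Int) - 38

-- one iteration of B's loop body for the group starting at index gi
def pvStepB (lines : List String) (score : Int) (gi : Int) : Int :=
  let group := PySem.List.slice lines (some gi) (some (gi + 3))
  let counts : PySem.Dict Char Int :=
    (PySem.List.pyRange 0 3 1).foldl (fun d li =>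
      (PySem.Set.ofList (PySem.List.pyGetD group li "").toList).foldl
        (fun d c => d.insert c (d.getD c 0 + 1)) d)
      PySem.Dict.empty
  -- counts[char] for char in dict.fromkeys(group[0]) is always present; getD is exact here
  let common := (PySem.List.dedup (PySem.List.pyGetD group 0 "").toList).filter
    (fun c => counts.getD c 0 == 3)
  if common.length ≠ 1 then score  -- raise ValueError: outside Pre_
  else score + pvPriorityOrd (PySem.List.pyGetD common 0 ' ')

def part2_alt (input_data : String) : Int :=
  let lines := pvLines input_data
  (PySem.List.pyRange 0 lines.length 3).foldl (pvStepB lines) 0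

-- ===== PRECONDITION & SPEC =====
-- the distinct chars of a group's line 0 present in its lines 1 and 2 as well
def pvGroupCommon (lines : List String) (gi : Int) : List Char :=
  let group := PySem.List.slice lines (some gi) (some (gi + 3))
  (PySem.List.dedup (PySem.List.pyGetD group 0 "").toList).filter
    (fun c => decide (c ∈ (PySem.List.pyGetD group 1 "").toList) &&
              decide (c ∈ (PySem.List.pyGetD group 2 "").toList))

-- ASCII-letter test used by Pre_
def pvLetterB (c : Char) : Bool := (65 ≤ c.toNat && c.toNat ≤ 90) || (97 ≤ c.toNat && c.toNat ≤ 122)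

-- Pre_ excludes exactly the inputs where A raises: a group whose (up to three) lines do
-- not have exactly one common character — which covers a last group of fewer than three
-- nonempty lines, where A's group[2] is an IndexError, since pyGetD's "" default makes
-- that group's common list empty — and a common character that is not an ASCII letter
-- (ValueError from string.ascii_letters.index).
def Pre_part2 (input_data : String) : Prop :=
  ∀ gi ∈ PySem.List.pyRange 0 (pvLines input_data).length 3,
    (pvGroupCommon (pvLines input_data) gi).length = 1 ∧
    (pvGroupCommon (pvLines input_data) gi).all pvLetterB = true
instance (input_data : String) : Decidable (Pre_part2 input_data) := by unfold Pre_part2; infer_instance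

def pvWitness_part2 : String := "a\na\na"

def Spec_part2 (input_data : String) (out : Int) : Prop := out = part2_alt input_data
instance (input_data : String) (out : Int) : Decidable (Spec_part2 input_data out) := by unfold Spec_part2; infer_instance

-- ===== CLAIM (what is proved, stated in full; the proofs are below) =====
def Claim_equal_part2 : Prop := ∀ (input_data : String), Dom_part2 input_data → Pre_part2 input_data → Spec_part2 input_data (part2 input_data)

-- ===== LEMMAS AND PROOFS =====

-- ascii_letters.index-based priority agrees with ord arithmetic on ASCII letters
lemma pvPriority_eq_ord (c : Char)
    (hb : (65 ≤ c.toNat ∧ c.toNat ≤ 90) ∨ (97 ≤ c.toNat ∧ c.toNat ≤ 122)) :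
    pvPriority c = pvPriorityOrd c := by
  obtain ⟨n, rfl, hn⟩ : ∃ n, Char.ofNat n = c ∧ ((65 ≤ n ∧ n ≤ 90) ∨ (97 ≤ n ∧ n ≤ 122)) :=
    ⟨c.toNat, Char.ofNat_toNat c, hb⟩
  rcases hn with ⟨h1, h2⟩ | ⟨h1, h2⟩ <;> interval_cases n <;> decide

-- membership test of a Python set equals membership in the underlying list
lemma pvContains_ofList (l : List Char) (x : Char) :
    (PySem.Set.ofList l).contains x = decide (x ∈ l) := by
  rw [Bool.eq_iff_iff]; simp [PySem.Set.mem_ofList]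

lemma pvStep_eq (lines : List String) (gi : Int)
    (h1 : (pvGroupCommon lines gi).length = 1)
    (h2 : (pvGroupCommon lines gi).all pvLetterB = true) (score : Int) :
    pvStepA lines score gi = pvStepB lines score gi := by
  have hrange : PySem.List.pyRange 0 3 1 = ([0, 1, 2] : List Int) := by decide
  simp only [pvStepA, pvStepB, hrange, List.foldl_cons, List.foldl_nil]
  -- A's common set is pvGroupCommon
  have hA : PySem.Set.inter (PySem.Set.inter
        (PySem.Set.ofList (PySem.List.pyGetD (PySem.List.slice lines (some gi) (some (gi + 3))) 0 "").toList)
        (PySem.Set.ofList (PySem.List.pyGetD (PySem.List.slice lines (some gi) (some (gi + 3))) 1 "").toList))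
      (PySem.Set.ofList (PySem.List.pyGetD (PySem.List.slice lines (some gi) (some (gi + 3))) 2 "").toList)
      = pvGroupCommon lines gi := by
    show (_root_.List.filter _ (_root_.List.filter _ _)) = _
    rw [List.filter_filter]
    simp only [pvGroupCommon, PySem.List.dedup_eq_ofList]
    exact List.filter_congr (fun x _ => by
      rw [pvContains_ofList, pvContains_ofList, Bool.and_comm])
  -- B's common list is pvGroupCommon
  have hB : List.filter
      (fun c => (((PySem.Set.ofList (PySem.List.pyGetD (PySem.List.slice lines (some gi) (some (gi + 3))) 2 "").toList).foldl
          (fun d c => d.insert c (d.getD c 0 + 1))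
        ((PySem.Set.ofList (PySem.List.pyGetD (PySem.List.slice lines (some gi) (some (gi + 3))) 1 "").toList).foldl
          (fun d c => d.insert c (d.getD c 0 + 1))
        ((PySem.Set.ofList (PySem.List.pyGetD (PySem.List.slice lines (some gi) (some (gi + 3))) 0 "").toList).foldl
          (fun d c => d.insert c (d.getD c 0 + 1)) PySem.Dict.empty))).getD c 0 == (3 : Int)))
      (PySem.List.dedup (PySem.List.pyGetD (PySem.List.slice lines (some gi) (some (gi + 3))) 0 "").toList)
      = pvGroupCommon lines gi := by
    simp only [pvGroupCommon, PySem.List.dedup_eq_ofList]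
    refine List.filter_congr (fun c hc => ?_)
    rw [PySem.Dict.getD_foldl_insert_add_one, PySem.Dict.getD_foldl_insert_add_one,
        PySem.Dict.getD_foldl_insert_add_one, PySem.Dict.getD_empty]
    have e0 : (PySem.Set.ofList (PySem.List.pyGetD (PySem.List.slice lines (some gi) (some (gi + 3))) 0 "").toList).count c = 1 :=
      List.count_eq_one_of_mem (PySem.Set.nodup_ofList _) hc
    have e1 : ∀ l : List Char, ((PySem.Set.ofList l).count c : Int) = if c ∈ l then 1 else 0 := by
      intro l
      by_cases h : c ∈ l
      · rw [List.count_eq_one_of_mem (PySem.Set.nodup_ofList l)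
          ((PySem.Set.mem_ofList l c).mpr h), if_pos h]
        norm_num
      · simp [h, List.count_eq_zero.mpr (fun hx => h ((PySem.Set.mem_ofList l c).mp hx))]
    rw [Bool.eq_iff_iff]
    rw [e0, e1, e1]
    by_cases hm1 : c ∈ (PySem.List.pyGetD (PySem.List.slice lines (some gi) (some (gi + 3))) 1 "").toList <;>
      by_cases hm2 : c ∈ (PySem.List.pyGetD (PySem.List.slice lines (some gi) (some (gi + 3))) 2 "").toList <;>
      simp [hm1, hm2]
  rw [hA, hB]

  obtain ⟨c, hc⟩ := List.length_eq_one_iff.mp h1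
  have hcmem : c ∈ pvGroupCommon lines gi := by rw [hc]; exact List.mem_singleton_self c
  rw [hc]
  rw [if_neg (by simp), if_neg (by simp)]
  have hb : (65 ≤ c.toNat ∧ c.toNat ≤ 90) ∨ (97 ≤ c.toNat ∧ c.toNat ≤ 122) := by
    have hc' := List.all_eq_true.mp h2 c hcmem
    simp only [pvLetterB, Bool.or_eq_true, Bool.and_eq_true, decide_eq_true_eq] at hc'
    exact hc'
  simp [PySem.List.pyGetD_zero_cons, pvPriority_eq_ord c hb]

-- ===== VERDICT (by name: the statement is the Claim_ definition above) =====
theorem part2_spec : Claim_equal_part2 := by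
  intro input_data _ hpre
  unfold Spec_part2 part2 part2_alt
  exact PySem.List.foldl_congr_mem _ _ _ _ (fun score gi hgi =>
    pvStep_eq (pvLines input_data) gi (hpre gi hgi).1 (hpre gi hgi).2 score)
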